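-- pv_equiv track=rewrite | github.com/ranonymousse/cdv-explorer | paper/RQ3/authorship_overview.py | _prepare_histogram_series
-- ===== SOURCE A (Python) =====
-- def _prepare_histogram_series(
--     contribution_histogram: list[dict[str, int]],
-- ) -> list[dict[str, int]]:
--     if not contribution_histogram:
--         raise ValueError("Authorship overview requires non-empty contribution_histogram data.")
--
--     histogram_points = sorted(
--         (
--             {
--                 "bips_written": int(entry["bips_written"]),
--                 "authors": int(entry["authors"]),
--             }
--             for entry in contribution_histogram
--             if int(entry["bips_written"]) > 0
--         ),
--         key=lambda entry: entry["bips_written"],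
--     )
--     if not histogram_points:
--         raise ValueError("Authorship overview requires positive histogram buckets.")
--
--     min_bips_written = histogram_points[0]["bips_written"]
--     max_bips_written = histogram_points[-1]["bips_written"]
--     authors_by_bucket = {
--         entry["bips_written"]: entry["authors"]
--         for entry in histogram_points
--     }
--     histogram_series = [
--         {
--             "bips_written": bips_written,
--             "authors": authors_by_bucket.get(bips_written, 0),
--         }
--         for bips_written in range(min_bips_written, max_bips_written + 1)
--     ]
--
--     return histogram_series
-- ===== SOURCE B (Python) =====
-- def _prepare_histogram_series(
--     contribution_histogram: list[dict[str, int]],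
-- ) -> list[dict[str, int]]:
--     if not contribution_histogram:
--         raise ValueError("Authorship overview requires non-empty contribution_histogram data.")
--
--     lo = None
--     hi = None
--     buckets = []
--     for entry in contribution_histogram:
--         bips = int(entry["bips_written"])
--         if bips > 0:
--             authors = int(entry["authors"])
--             buckets.append((bips, authors))
--             if lo is None or bips < lo:
--                 lo = bips
--             if hi is None or hi < bips:
--                 hi = bips
--     if lo is None:
--         raise ValueError("Authorship overview requires positive histogram buckets.")
--
--     series_authors = [0] * (hi - lo + 1)
--     for bips, authors in buckets:
--         series_authors[bips - lo] = authors
--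
--     return [
--         {"bips_written": lo + offset, "authors": authors}
--         for offset, authors in enumerate(series_authors)
--     ]
-- ===== Notes on version B (the rewrite author's own statement) =====
-- stated objective: simpler
-- what changed: Replaces sort-then-dict (stable sort, head/last for min/max, dict comprehension, dict.get over range) with a single pass tracking running min/max and collected positive buckets, then filling a flat [0]*(hi-lo+1) array by index instead of a dict lookup.
import Mathlib
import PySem

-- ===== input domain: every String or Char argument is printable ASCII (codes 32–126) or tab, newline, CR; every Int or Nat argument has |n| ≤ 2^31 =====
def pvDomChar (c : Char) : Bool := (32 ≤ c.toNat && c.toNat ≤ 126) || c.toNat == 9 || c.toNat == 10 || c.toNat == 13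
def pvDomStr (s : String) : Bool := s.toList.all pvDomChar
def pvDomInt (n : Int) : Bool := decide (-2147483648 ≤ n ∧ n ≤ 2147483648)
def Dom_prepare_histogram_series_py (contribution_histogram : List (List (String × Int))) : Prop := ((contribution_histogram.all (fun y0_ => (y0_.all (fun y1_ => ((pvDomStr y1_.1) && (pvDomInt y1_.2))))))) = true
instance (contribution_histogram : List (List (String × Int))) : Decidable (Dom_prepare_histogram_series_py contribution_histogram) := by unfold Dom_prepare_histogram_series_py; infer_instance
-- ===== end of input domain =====

-- B replaces A's sort-then-dict pipeline by a single min/max-tracking pass plus a flat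
-- index-assigned array for the dense fill (objective: simpler; same observable behaviour).


-- shared helper: entry[k] on a dict-as-association-list (first match; key presence is Pre_'s job)
def pvGetS (e : List (String × Int)) (k : String) : Option Int :=
  (e.find? (fun p => p.1 == k)).map (·.2)
def pvBW (e : List (String × Int)) : Int := (pvGetS e "bips_written").getD 0
def pvAU (e : List (String × Int)) : Int := (pvGetS e "authors").getD 0
-- A's generator expression: the positive buckets as (bips_written, authors), input order
def pvPts (h : List (List (String × Int))) : List (Int × Int) :=
  h.filterMap (fun e => if pvBW e > 0 then some (pvBW e, pvAU e) else none)

-- ===== PORT A =====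
def prepare_histogram_series_py (contribution_histogram : List (List (String × Int))) : List (List (String × Int)) :=
  if contribution_histogram = [] then []
  else
    let pts := PySem.List.sorted (pvPts contribution_histogram) (fun p => p.1)
    if pts = [] then []
    else
      let minb := (PySem.List.pyGetD pts 0 ((0 : Int), (0 : Int))).1
      let maxb := (PySem.List.pyGetD pts (-1) ((0 : Int), (0 : Int))).1
      let abb := pts.foldl (fun d p => d.insert p.1 p.2) (PySem.Dict.empty (κ := Int) (ν := Int))
      (PySem.List.pyRange minb (maxb + 1) 1).map
        (fun b => [("bips_written", b), ("authors", abb.getD b 0)])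

-- ===== PORT B =====
-- 'if lo is None or bips < lo: lo = bips'
def updLo (o : Option Int) (b : Int) : Option Int :=
  match o with
  | none => some b
  | some l => if b < l then some b else some l
-- 'if hi is None or hi < bips: hi = bips'
def updHi (o : Option Int) (b : Int) : Option Int :=
  match o with
  | none => some b
  | some u => if u < b then some b else some u
-- loop body of B's single pass: running min, running max, positive buckets in input order
def altStep (st : Option Int × Option Int × List (Int × Int)) (e : List (String × Int)) :
    Option Int × Option Int × List (Int × Int) :=
  let b := pvBW e
  if b > 0 then
    (updLo st.1 b, updHi st.2.1 b, st.2.2 ++ [(b, pvAU e)])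
  else st

def prepare_histogram_series_py_alt (contribution_histogram : List (List (String × Int))) : List (List (String × Int)) :=
  if contribution_histogram = [] then []
  else
    match contribution_histogram.foldl altStep (none, none, []) with
    | (some lo, some hi, buckets) =>
      let arr := buckets.foldl (fun a p => a.set (p.1 - lo).toNat p.2)
        (List.replicate (hi - lo + 1).toNat (0 : Int))
      (PySem.List.enumerate arr 0).map
        (fun p => [("bips_written", lo + p.1), ("authors", p.2)])
    | _ => []

-- ===== PRECONDITION & SPEC =====
-- Pre_ excludes exactly the inputs where the Python raises: the empty list and the
-- no-positive-bucket case (ValueError), and entries whose dict misses a key the code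
-- reads ("bips_written" always; "authors" on positive buckets) — KeyError.
def Pre_prepare_histogram_series_py (contribution_histogram : List (List (String × Int))) : Prop :=
  contribution_histogram ≠ [] ∧
  (∀ e ∈ contribution_histogram,
      (pvGetS e "bips_written").isSome = true ∧ (pvBW e > 0 → (pvGetS e "authors").isSome = true)) ∧
  ∃ e ∈ contribution_histogram, pvBW e > 0
instance (contribution_histogram : List (List (String × Int))) : Decidable (Pre_prepare_histogram_series_py contribution_histogram) := by unfold Pre_prepare_histogram_series_py; infer_instance

def pvWitness_prepare_histogram_series_py : (List (List (String × Int))) :=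
  [[("bips_written", 2), ("authors", 5)], [("bips_written", 0), ("authors", 1)]]

def Spec_prepare_histogram_series_py (contribution_histogram : List (List (String × Int))) (out : List (List (String × Int))) : Prop := out = prepare_histogram_series_py_alt contribution_histogram
instance (contribution_histogram : List (List (String × Int))) (out : List (List (String × Int))) : Decidable (Spec_prepare_histogram_series_py contribution_histogram out) := by unfold Spec_prepare_histogram_series_py; infer_instance

-- ===== CLAIM (what is proved, stated in full; the proofs are below) =====
def Claim_equal_prepare_histogram_series_py : Prop := ∀ (contribution_histogram : List (List (String × Int))), Dom_prepare_histogram_series_py contribution_histogram → Pre_prepare_histogram_series_py contribution_histogram → Spec_prepare_histogram_series_py contribution_histogram (prepare_histogram_series_py contribution_histogram)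

-- ===== LEMMAS AND PROOFS =====

-- B's fold over the raw input equals a fold over the positive buckets
def step2 (st : Option Int × Option Int × List (Int × Int)) (p : Int × Int) :
    Option Int × Option Int × List (Int × Int) :=
  (updLo st.1 p.1, updHi st.2.1 p.1, st.2.2 ++ [p])

theorem foldl_altStep (h : List (List (String × Int))) :
    ∀ st, h.foldl altStep st = (pvPts h).foldl step2 st := by
  induction h with
  | nil => intro st; rfl
  | cons e t ih =>
    intro st
    by_cases hb : pvBW e > 0
    · simp [pvPts, hb, altStep, step2, ih]
    · simp [pvPts, hb, altStep, ih]

theorem foldl_step2_split (L : List (Int × Int)) :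
    ∀ lo hi bk, L.foldl step2 (lo, hi, bk) =
      (L.foldl (fun o p => updLo o p.1) lo, L.foldl (fun o p => updHi o p.1) hi, bk ++ L) := by
  induction L with
  | nil => intro lo hi bk; simp
  | cons p t ih => intro lo hi bk; simp [step2, ih]

-- min/max folds
theorem foldl_updLo_some (L : List (Int × Int)) :
    ∀ l, L.foldl (fun o p => updLo o p.1) (some l) =
      some (L.foldl (fun m p => min m p.1) l) := by
  induction L with
  | nil => intro l; rfl
  | cons p t ih =>
    intro l
    have he : updLo (some l) p.1 = some (min l p.1) := by
      simp only [updLo]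
      rcases lt_or_ge p.1 l with hc | hc
      · rw [if_pos hc, min_eq_right (le_of_lt hc)]
      · rw [if_neg (not_lt.mpr hc), min_eq_left hc]
    simp only [List.foldl_cons, he, ih]

theorem foldl_updHi_some (L : List (Int × Int)) :
    ∀ l, L.foldl (fun o p => updHi o p.1) (some l) =
      some (L.foldl (fun m p => max m p.1) l) := by
  induction L with
  | nil => intro l; rfl
  | cons p t ih =>
    intro l
    have he : updHi (some l) p.1 = some (max l p.1) := by
      simp only [updHi]
      rcases lt_or_ge l p.1 with hc | hc
      · rw [if_pos hc, max_eq_right (le_of_lt hc)]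
      · rw [if_neg (not_lt.mpr hc), max_eq_left hc]
    simp only [List.foldl_cons, he, ih]

theorem foldl_min_le_init (L : List (Int × Int)) :
    ∀ l, L.foldl (fun m p => min m p.1) l ≤ l := by
  induction L with
  | nil => intro l; simp
  | cons p t ih => intro l; exact le_trans (ih _) (min_le_left _ _)

theorem foldl_min_le_mem (L : List (Int × Int)) :
    ∀ l p, p ∈ L → L.foldl (fun m q => min m q.1) l ≤ p.1 := by
  induction L with
  | nil => intro _ _ hp; simp at hp
  | cons q t ih =>
    intro l p hp
    rcases List.mem_cons.mp hp with hc | hc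
    · subst hc; exact le_trans (foldl_min_le_init t _) (min_le_right _ _)
    · exact ih _ _ hc

theorem foldl_min_mem (L : List (Int × Int)) :
    ∀ l, L.foldl (fun m p => min m p.1) l = l ∨
      ∃ p ∈ L, L.foldl (fun m q => min m q.1) l = p.1 := by
  induction L with
  | nil => intro l; left; rfl
  | cons q t ih =>
    intro l
    rcases ih (min l q.1) with hc | ⟨p, hp, hc⟩
    · rcases min_cases l q.1 with ⟨he, _⟩ | ⟨he, _⟩
      · left; simpa [he] using hc
      · right; exact ⟨q, by simp, by simpa [he] using hc⟩
    · right; exact ⟨p, by simp [hp], by simpa using hc⟩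

theorem foldl_max_ge_init (L : List (Int × Int)) :
    ∀ l, l ≤ L.foldl (fun m p => max m p.1) l := by
  induction L with
  | nil => intro l; simp
  | cons p t ih => intro l; exact le_trans (le_max_left _ _) (ih _)

theorem foldl_max_ge_mem (L : List (Int × Int)) :
    ∀ l p, p ∈ L → p.1 ≤ L.foldl (fun m q => max m q.1) l := by
  induction L with
  | nil => intro _ _ hp; simp at hp
  | cons q t ih =>
    intro l p hp
    rcases List.mem_cons.mp hp with hc | hc
    · subst hc; exact le_trans (le_max_right _ _) (foldl_max_ge_init t _)
    · exact ih _ _ hc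

theorem foldl_max_mem (L : List (Int × Int)) :
    ∀ l, L.foldl (fun m p => max m p.1) l = l ∨
      ∃ p ∈ L, L.foldl (fun m q => max m q.1) l = p.1 := by
  induction L with
  | nil => intro l; left; rfl
  | cons q t ih =>
    intro l
    rcases ih (max l q.1) with hc | ⟨p, hp, hc⟩
    · rcases max_cases l q.1 with ⟨he, _⟩ | ⟨he, _⟩
      · left; simpa [he] using hc
      · right; exact ⟨q, by simp, by simpa [he] using hc⟩
    · right; exact ⟨p, by simp [hp], by simpa using hc⟩

-- the value a last-wins scan assigns to key b
def lastv (L : List (Int × Int)) (b : Int) (cur : Int) : Int :=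
  L.foldl (fun acc p => if p.1 = b then p.2 else acc) cur

theorem lastv_cons (p : Int × Int) (t : List (Int × Int)) (b cur : Int) :
    lastv (p :: t) b cur = lastv t b (if p.1 = b then p.2 else cur) := rfl

theorem lastv_append (s t : List (Int × Int)) (b cur : Int) :
    lastv (s ++ t) b cur = lastv t b (lastv s b cur) := by
  simp [lastv, List.foldl_append]

theorem lastv_nochange (L : List (Int × Int)) (b : Int) :
    ∀ cur, (∀ p ∈ L, p.1 ≠ b) → lastv L b cur = cur := by
  induction L with
  | nil => intro cur _; rfl
  | cons q t ih =>
    intro cur hall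
    rw [lastv_cons, if_neg (hall q (by simp))]
    exact ih cur (fun p hp => hall p (by simp [hp]))

theorem lastv_insertBy (x : Int × Int) (b : Int) (acc : List (Int × Int)) :
    ∀ cur, acc.Pairwise (fun a c => a.1 ≤ c.1) →
      lastv (PySem.List.insertBy (fun a c => decide (a.1 < c.1)) x acc) b cur =
        if x.1 = b then x.2 else lastv acc b cur := by
  induction acc with
  | nil =>
    intro cur _
    by_cases hxb : x.1 = b <;> simp [PySem.List.insertBy, lastv, hxb]
  | cons y ys ih =>
    intro cur hpw
    rw [List.pairwise_cons] at hpw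
    by_cases hlt : x.1 < y.1
    · have hins : PySem.List.insertBy (fun a c => decide (a.1 < c.1)) x (y :: ys) =
          x :: y :: ys := by
        simp [PySem.List.insertBy, hlt]
      rw [hins, lastv_cons]
      by_cases hxb : x.1 = b
      · rw [if_pos hxb, if_pos hxb]
        refine lastv_nochange (y :: ys) b x.2 ?_
        intro p hp
        rcases List.mem_cons.mp hp with hc | hc
        · subst hc; omega
        · have := hpw.1 p hc; omega
      · rw [if_neg hxb, if_neg hxb]
    · have hins : PySem.List.insertBy (fun a c => decide (a.1 < c.1)) x (y :: ys) =
          y :: PySem.List.insertBy (fun a c => decide (a.1 < c.1)) x ys := by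
        simp [PySem.List.insertBy, hlt]
      rw [hins, lastv_cons, ih _ hpw.2, lastv_cons]

-- stability of the sort for a last-wins scan: sorting does not change the value per key
theorem lastv_sorted (b : Int) (P : List (Int × Int)) :
    lastv (PySem.List.sorted P (fun p => p.1)) b 0 = lastv P b 0 := by
  induction P using List.reverseRecOn with
  | nil => rfl
  | append_singleton Q x ih =>
    have hsrt : PySem.List.sorted (Q ++ [x]) (fun p : Int × Int => p.1) =
        PySem.List.insertBy (fun a c => decide (a.1 < c.1)) x
          (PySem.List.sorted Q (fun p => p.1)) := by
      rw [PySem.List.sorted_eq_foldl_insertBy, PySem.List.sorted_eq_foldl_insertBy,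
        List.foldl_append, List.foldl_cons, List.foldl_nil]
    rw [hsrt, lastv_insertBy x b _ 0 (PySem.List.sorted_pairwise Q (fun p => p.1)), ih,
      lastv_append, lastv_cons]
    rfl

-- A's dict loop computes lastv
theorem dict_fold_getD (L : List (Int × Int)) :
    ∀ (d : PySem.Dict Int Int) (b : Int),
      (L.foldl (fun d p => d.insert p.1 p.2) d).getD b 0 = lastv L b (d.getD b 0) := by
  induction L with
  | nil => intro d b; rfl
  | cons q t ih =>
    intro d b
    rw [List.foldl_cons, ih, lastv_cons]
    have he : (d.insert q.1 q.2).getD b 0 = if q.1 = b then q.2 else d.getD b 0 := by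
      rw [PySem.Dict.getD_insert]
      rcases eq_or_ne q.1 b with rfl | hne
      · simp
      · rw [if_neg (by omega), if_neg hne]
    rw [he]

-- B's array loop computes lastv (keys bounded below by lo keep indices faithful)
theorem set_fold_getD (lo : Int) (L : List (Int × Int)) :
    ∀ (arr : List Int) (k : Nat), (∀ p ∈ L, lo ≤ p.1) → k < arr.length →
      (L.foldl (fun a p => a.set (p.1 - lo).toNat p.2) arr).getD k 0 =
        lastv L (lo + k) (arr.getD k 0) := by
  induction L with
  | nil => intro arr k _ _; rfl
  | cons q t ih =>
    intro arr k hall hk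
    have hq : lo ≤ q.1 := hall q (by simp)
    rw [List.foldl_cons, ih _ k (fun p hp => hall p (by simp [hp])) (by simp [hk]), lastv_cons]
    have he : (arr.set (q.1 - lo).toNat q.2).getD k 0 =
        if q.1 = lo + (k : Int) then q.2 else arr.getD k 0 := by
      rw [List.getD_eq_getElem?_getD, List.getElem?_set, List.getD_eq_getElem?_getD]
      by_cases hce : q.1 = lo + (k : Int)
      · have h1 : (q.1 - lo).toNat = k := by omega
        simp [hce, hk]
      · have h1 : (q.1 - lo).toNat ≠ k := by omega
        simp [h1, hce]
    rw [he]

theorem length_set_fold (lo : Int) (L : List (Int × Int)) :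
    ∀ (arr : List Int),
      (L.foldl (fun a p => a.set (p.1 - lo).toNat p.2) arr).length = arr.length := by
  induction L with
  | nil => intro arr; rfl
  | cons q t ih => intro arr; rw [List.foldl_cons, ih]; simp

-- keys of the sorted list are bounded by its last element's key
theorem sorted_getLast_key_ge (P : List (Int × Int))
    (hne : PySem.List.sorted P (fun p => p.1) ≠ []) :
    ∀ y ∈ P, y.1 ≤ ((PySem.List.sorted P (fun p => p.1)).getLast hne).1 := by
  intro y hy
  have hy' : y ∈ PySem.List.sorted P (fun p : Int × Int => p.1) :=
    (PySem.List.mem_sorted P _ false y).mpr hy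
  obtain ⟨i, hi, hget⟩ := List.mem_iff_getElem.mp hy'
  rw [List.getLast_eq_getElem, ← hget]
  exact PySem.List.key_sorted_getElem_mono P (fun p => p.1) (by omega) (by omega)

theorem main_equiv (h : List (List (String × Int))) :
    prepare_histogram_series_py h = prepare_histogram_series_py_alt h := by
  by_cases hnil : h = []
  · simp [prepare_histogram_series_py, prepare_histogram_series_py_alt, hnil]
  · rcases hP : pvPts h with _ | ⟨q, T⟩
    · -- no positive bucket: both return []
      have hB : h.foldl altStep (none, none, []) = (none, none, ([] : List (Int × Int))) := by
        rw [foldl_altStep, hP]; rfl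
      unfold prepare_histogram_series_py prepare_histogram_series_py_alt
      rw [if_neg hnil, if_neg hnil, hP, hB]
      rfl
    · -- at least one positive bucket
      set m : Int := T.foldl (fun a p => min a p.1) q.1 with hm
      set M : Int := T.foldl (fun a p => max a p.1) q.1 with hM
      set S : List (Int × Int) := PySem.List.sorted (q :: T) (fun p => p.1) with hS
      have hSne : S ≠ [] := by
        rw [hS, Ne, PySem.List.sorted_eq_nil_iff]; simp
      have hfold : h.foldl altStep (none, none, []) = (some m, some M, q :: T) := by
        rw [foldl_altStep, hP, List.foldl_cons]
        show T.foldl step2 (some q.1, some q.1, [] ++ [q]) = _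
        rw [foldl_step2_split, foldl_updLo_some, foldl_updHi_some]
        rfl
      -- reduce both sides
      have hAred : prepare_histogram_series_py h =
          (PySem.List.pyRange (PySem.List.pyGetD S 0 ((0:Int),(0:Int))).1
            ((PySem.List.pyGetD S (-1) ((0:Int),(0:Int))).1 + 1) 1).map
            (fun b => [("bips_written", b),
              ("authors", (S.foldl (fun d p => d.insert p.1 p.2)
                (PySem.Dict.empty (κ := Int) (ν := Int))).getD b 0)]) := by
        unfold prepare_histogram_series_py
        rw [if_neg hnil, hP]
        show (if S = [] then [] else _) = _
        rw [if_neg hSne]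
      have hBred : prepare_histogram_series_py_alt h =
          (PySem.List.enumerate ((q :: T).foldl (fun a p => a.set (p.1 - m).toNat p.2)
              (List.replicate (M - m + 1).toNat (0 : Int))) 0).map
            (fun p => [("bips_written", m + p.1), ("authors", p.2)]) := by
        unfold prepare_histogram_series_py_alt
        rw [if_neg hnil, hfold]
      rw [hAred, hBred]
      -- min/max facts for the bucket keys
      have hmle : ∀ p ∈ (q :: T), m ≤ p.1 := by
        intro p hp
        rcases List.mem_cons.mp hp with hc | hc
        · subst hc; exact foldl_min_le_init T _
        · exact foldl_min_le_mem T _ _ hc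
      have hmmem : ∃ p ∈ (q :: T), m = p.1 := by
        rcases foldl_min_mem T q.1 with hc | ⟨p, hp, hc⟩
        · exact ⟨q, by simp, hm.trans hc⟩
        · exact ⟨p, by simp [hp], hm.trans hc⟩
      have hMge : ∀ p ∈ (q :: T), p.1 ≤ M := by
        intro p hp
        rcases List.mem_cons.mp hp with hc | hc
        · subst hc; exact foldl_max_ge_init T _
        · exact foldl_max_ge_mem T _ _ hc
      have hMmem : ∃ p ∈ (q :: T), M = p.1 := by
        rcases foldl_max_mem T q.1 with hc | ⟨p, hp, hc⟩
        · exact ⟨q, by simp, hM.trans hc⟩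
        · exact ⟨p, by simp [hp], hM.trans hc⟩
      -- A's head key is m
      obtain ⟨p0, pt, hcons⟩ := List.exists_cons_of_ne_nil hSne
      have hget0 : PySem.List.pyGetD S 0 ((0:Int),(0:Int)) = p0 := by
        rw [hcons]; exact PySem.List.pyGetD_zero_cons _ _ _
      have hminb : p0.1 = m := by
        have h1 : ∀ y ∈ (q :: T), p0.1 ≤ y.1 :=
          PySem.List.key_head_sorted_le (q :: T) (fun p => p.1) (hS.symm.trans hcons)
        have h2 : p0 ∈ (q :: T) := by
          have : p0 ∈ S := by rw [hcons]; simp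
          rw [hS] at this
          exact (PySem.List.mem_sorted _ _ _ _).mp this
        rcases hmmem with ⟨p, hp, he⟩
        have := h1 p hp
        have := hmle p0 h2
        omega
      -- A's last key is M
      have hgetm1 : PySem.List.pyGetD S (-1) ((0:Int),(0:Int)) = S.getLast hSne :=
        PySem.List.pyGetD_neg_one S _ hSne
      have hmaxb : (S.getLast hSne).1 = M := by
        have h2 : S.getLast hSne ∈ (q :: T) :=
          (PySem.List.mem_sorted (q :: T) (fun p => p.1) false _).mp (List.getLast_mem hSne)
        rcases hMmem with ⟨p, hp, he⟩
        have h1 : p.1 ≤ (S.getLast hSne).1 := sorted_getLast_key_ge (q :: T) hSne p hp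
        have := hMge _ h2
        omega
      rw [hget0, hgetm1, hminb, hmaxb]
      -- both sides are maps over List.range N
      set N : Nat := (M - m + 1).toNat with hN
      set arr : List Int := (q :: T).foldl (fun a p => a.set (p.1 - m).toNat p.2)
        (List.replicate N (0 : Int)) with harr
      have harrlen : arr.length = N := by
        rw [harr, length_set_fold]; simp
      rw [PySem.List.enumerate_eq_map_pyRange arr 0, List.map_map]
      rw [PySem.List.pyRange_one, PySem.List.pyRange_one, List.map_map, List.map_map]
      have hNa : (M + 1 - m).toNat = N := by omega
      have hNb : (PySem.List.len arr - 0).toNat = N := by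
        simp [PySem.List.len_eq, harrlen]
      rw [hNa, hNb]
      apply List.map_congr_left
      intro k hk
      have hkN : k < N := List.mem_range.mp hk
      simp only [Function.comp]
      have hAval : ((S.foldl (fun d p => d.insert p.1 p.2)
          (PySem.Dict.empty (κ := Int) (ν := Int))).getD (m + k) 0) =
          lastv (q :: T) (m + k) 0 := by
        rw [dict_fold_getD]
        rw [show (PySem.Dict.empty (κ := Int) (ν := Int)).getD (m + k) 0 = 0 from rfl]
        rw [hS, lastv_sorted]
      have hBval : PySem.List.pyGetD arr ((0 : Int) + (k : Int)) 0 = lastv (q :: T) (m + k) 0 := by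
        rw [show ((0 : Int) + (k : Int)) = ((k : Nat) : Int) by omega, PySem.List.pyGetD_natCast]
        rw [harr, set_fold_getD m (q :: T) _ k hmle (by simp [hkN])]
        simp [hkN]
      rw [hAval, hBval]
      norm_num

-- ===== VERDICT (by name: the statement is the Claim_ definition above) =====
theorem prepare_histogram_series_py_spec : Claim_equal_prepare_histogram_series_py := by
  intro h _ _
  unfold Spec_prepare_histogram_series_py
  exact main_equiv h
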